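-- pv_equiv track=rewrite | github.com/TOTOGT/PabloNogueira-dm3-lab | scripts/collatz_fibonacci_traces.py | fibonacci_path_weights
-- ===== SOURCE A (Python) =====
-- from collections import defaultdict
--
-- def fibonacci(n: int) -> int:
--     """Return F_n with F_1=1, F_2=1, F_3=2, …"""
--     if n <= 0:
--         return 0
--     a, b = 1, 1
--     for _ in range(n - 1):
--         a, b = b, a + b
--     return a
--
-- def fibonacci_path_weights(mapping: dict[int, int], num_steps: int) -> dict[tuple[int, int], int]:
--     """
--     Compute, for each (start, end) pair of odd residues mod 2^M,
--     the Fibonacci-weighted count of paths of length `num_steps`.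
--
--     Weight of a path of k Syracuse steps is F_k (Fibonacci number).
--     Here every path has the same length so the weight is simply F_{num_steps}
--     per path, but when we enumerate paths of *all* lengths up to num_steps
--     and weight by F_k, we get a richer structure.
--
--     This function returns the total F-weighted multiplicity for paths of
--     exactly `num_steps` steps from each start to each end.
--     """
--     # paths of length 1: direct edges, weight F_1 = 1
--     # paths of length k: compose k-1 paths + 1 step, cumulative weight F_k
--     # We build a matrix (as dict) and compose it.
--     nodes = sorted(mapping.keys())
--
--     # adjacency: adj[a][b] = 1 if T(a) = b (mod 2^M)
--     # Fibonacci-weighted matrix after k steps: W_k[a][b] = F_k * (number of length-k paths a→b)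
--     # Since T is deterministic, there is exactly 0 or 1 path of each length.
--     # W_k = F_k * (A^k) where A is the 0/1 adjacency matrix.
--     def mat_mult(A: dict, B: dict, nodes: list[int]) -> dict:
--         C: dict = defaultdict(lambda: defaultdict(int))
--         for i in nodes:
--             for j in nodes:
--                 if A[i][j] != 0:
--                     for k in nodes:
--                         if B[j][k] != 0:
--                             C[i][k] += A[i][j] * B[j][k]
--         return C
--
--     # Initial adjacency matrix A (step 1)
--     A: dict = defaultdict(lambda: defaultdict(int))
--     for src, tgt in mapping.items():
--         A[src][tgt] = 1
--
--     # Compute A^num_steps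
--     current = A
--     for _ in range(num_steps - 1):
--         current = mat_mult(current, A, nodes)
--
--     fib_weight = fibonacci(num_steps)
--     result = {}
--     for i in nodes:
--         for j in nodes:
--             w = current[i][j]
--             if w > 0:
--                 result[(i, j)] = fib_weight * w
--     return result
-- ===== SOURCE B (Python) =====
-- def fibonacci(n: int) -> int:
--     a, b = 0, 1
--     for _ in range(max(n, 0)):
--         a, b = b, a + b
--     return a
--
--
-- def fibonacci_path_weights(mapping: dict, num_steps: int) -> dict:
--     # The map is deterministic, so there is at most one length-k path from each
--     # start: follow the edge chain directly instead of multiplying matrices.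
--     keys = mapping.keys()
--     fib = fibonacci(num_steps)
--     result = {}
--     for start in sorted(keys):
--         t = mapping[start]
--         if t not in keys:
--             continue
--         ok = True
--         for _ in range(num_steps - 1):
--             t = mapping[t]
--             if t not in keys:
--                 ok = False
--                 break
--         if ok:
--             result[(start, t)] = fib
--     return result
-- ===== Notes on version B (the rewrite author's own statement) =====
-- stated objective: faster
-- what changed: Instead of building a dense adjacency matrix over all keys and composing it num_steps-1 times with an O(n^3) triple loop, B follows the deterministic mapping num_steps times from each key (skipping chains that leave the key set), since a deterministic map admits at most one path of each length per start.
import Mathlib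
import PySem

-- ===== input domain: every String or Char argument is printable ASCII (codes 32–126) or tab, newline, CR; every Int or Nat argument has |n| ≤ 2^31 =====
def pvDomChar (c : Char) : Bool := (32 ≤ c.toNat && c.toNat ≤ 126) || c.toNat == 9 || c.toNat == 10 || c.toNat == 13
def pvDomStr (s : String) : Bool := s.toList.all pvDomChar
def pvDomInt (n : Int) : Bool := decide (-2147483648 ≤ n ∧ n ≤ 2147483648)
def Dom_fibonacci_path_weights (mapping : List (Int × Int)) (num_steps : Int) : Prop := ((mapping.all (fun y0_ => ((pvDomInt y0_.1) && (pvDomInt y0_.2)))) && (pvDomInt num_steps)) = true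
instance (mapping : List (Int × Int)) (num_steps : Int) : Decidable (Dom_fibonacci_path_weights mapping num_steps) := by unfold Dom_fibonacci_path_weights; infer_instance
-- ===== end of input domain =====

-- B replaces A's repeated O(n^3) matrix multiplication by directly following the
-- deterministic map num_steps times from each key (the map has at most one successor,
-- so each matrix power is a 0/1 indicator); same return value, including order.

-- ===== PORT A =====

-- helper `fibonacci` of A
def pvFib (n : Int) : Int :=
  if n ≤ 0 then 0
  else ((List.range (n - 1).toNat).foldl (fun (p : Int × Int) _ => (p.2, p.1 + p.2)) (1, 1)).1

-- A reads matrix entries through two defaultdict(int) layers: missing rows/cells are 0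
def pvMread (M : PySem.Dict Int (PySem.Dict Int Int)) (i k : Int) : Int :=
  (M.getD i PySem.Dict.empty).getD k 0

-- C[i][k] += v
def pvAddAt (M : PySem.Dict Int (PySem.Dict Int Int)) (i k v : Int) :
    PySem.Dict Int (PySem.Dict Int Int) :=
  M.insert i ((M.getD i PySem.Dict.empty).insert k ((M.getD i PySem.Dict.empty).getD k 0 + v))

-- A's local helper `mat_mult`
def pvMatMult (A B : PySem.Dict Int (PySem.Dict Int Int)) (nodes : List Int) :
    PySem.Dict Int (PySem.Dict Int Int) :=
  nodes.foldl (fun C i =>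
    nodes.foldl (fun C j =>
      if pvMread A i j ≠ 0 then
        nodes.foldl (fun C k =>
          if pvMread B j k ≠ 0 then pvAddAt C i k (pvMread A i j * pvMread B j k) else C) C
      else C) C) PySem.Dict.empty

-- the initial adjacency matrix loop `for src, tgt in mapping.items(): A[src][tgt] = 1`
def pvAdjOf (d : PySem.Dict Int Int) : PySem.Dict Int (PySem.Dict Int Int) :=
  d.items.foldl
    (fun M p => M.insert p.1 ((M.getD p.1 PySem.Dict.empty).insert p.2 1))
    PySem.Dict.empty

def fibonacci_path_weights (mapping : List (Int × Int)) (num_steps : Int) :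
    List (Int × Int × Int) :=
  let d := PySem.Dict.ofList mapping
  let nodes := PySem.List.sorted d.keys (fun x => x) false
  let adj := pvAdjOf d
  let current := (List.range (num_steps - 1).toNat).foldl (fun cur _ => pvMatMult cur adj nodes) adj
  let fib := pvFib num_steps
  nodes.foldl (fun res i =>
    nodes.foldl (fun res j =>
      let w := pvMread current i j
      if w > 0 then res ++ [(i, j, fib * w)] else res) res) []

-- ===== PORT B =====

-- B's `fibonacci`: same-signature helper, iterates from (0, 1)
def pvFibAlt (n : Int) : Int :=
  ((List.range (max n 0).toNat).foldl (fun (p : Int × Int) _ => (p.2, p.1 + p.2)) (0, 1)).1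

-- B's inner loop: follow the map, `none` = the chain left the key set (the `break`)
def pvChase (d : PySem.Dict Int Int) (ks : List Int) (t : Int) : Nat → Option Int
  | 0 => some t
  | m + 1 =>
    match d.get? t with
    | none => none          -- unreachable in B: t ∈ ks before every lookup
    | some u => if u ∈ ks then pvChase d ks u m else none

def fibonacci_path_weights_alt (mapping : List (Int × Int)) (num_steps : Int) :
    List (Int × Int × Int) :=
  let d := PySem.Dict.ofList mapping
  let ks := d.keys
  let fib := pvFibAlt num_steps
  (PySem.List.sorted ks (fun x => x) false).foldl (fun res start =>
    match d.get? start with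
    | none => res           -- unreachable: start ∈ ks
    | some t =>
      if t ∈ ks then
        match pvChase d ks t (num_steps - 1).toNat with
        | some tf => res ++ [(start, tf, fib)]
        | none => res
      else res) []

-- ===== PRECONDITION & SPEC =====
def Spec_fibonacci_path_weights (mapping : List (Int × Int)) (num_steps : Int) (out : List (Int × Int × Int)) : Prop := out = fibonacci_path_weights_alt mapping num_steps
instance (mapping : List (Int × Int)) (num_steps : Int) (out : List (Int × Int × Int)) : Decidable (Spec_fibonacci_path_weights mapping num_steps out) := by unfold Spec_fibonacci_path_weights; infer_instance

-- ===== CLAIM (what is proved, stated in full; the proofs are below) =====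
def Claim_equal_fibonacci_path_weights : Prop := ∀ (mapping : List (Int × Int)) (num_steps : Int), Dom_fibonacci_path_weights mapping num_steps → Spec_fibonacci_path_weights mapping num_steps (fibonacci_path_weights mapping num_steps)

-- ===== LEMMAS AND PROOFS =====

-- one step of the chain: successor if it stays inside ks
def pvStep (d : PySem.Dict Int Int) (ks : List Int) (u : Int) : Option Int :=
  match d.get? u with
  | none => none
  | some w => if w ∈ ks then some w else none

theorem pvChase_succ_right (d : PySem.Dict Int Int) (ks : List Int) (m : Nat) (t : Int) :
    pvChase d ks t (m + 1) = (pvChase d ks t m).bind (pvStep d ks) := by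
  induction m generalizing t with
  | zero =>
    cases h : d.get? t <;> simp [pvChase, pvStep, h]
  | succ m ih =>
    have hL : pvChase d ks t (m + 1 + 1) =
        (match d.get? t with | none => none | some u => if u ∈ ks then pvChase d ks u (m + 1) else none) := rfl
    have hR : pvChase d ks t (m + 1) =
        (match d.get? t with | none => none | some u => if u ∈ ks then pvChase d ks u m else none) := rfl
    rw [hL, hR]
    cases h : d.get? t with
    | none => simp
    | some u => by_cases hu : u ∈ ks <;> simp [hu, ih u]

theorem pvChase_mem (d : PySem.Dict Int Int) (ks : List Int) (m : Nat) (t k : Int)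
    (h : pvChase d ks t (m + 1) = some k) : k ∈ ks := by
  induction m generalizing t with
  | zero =>
    cases hg : d.get? t with
    | none => simp [pvChase, hg] at h
    | some u =>
      by_cases hu : u ∈ ks
      · simp [pvChase, hg, hu] at h; subst h; exact hu
      · simp [pvChase, hg, hu] at h
  | succ m ih =>
    cases hg : d.get? t with
    | none => simp [pvChase, hg] at h
    | some u =>
      by_cases hu : u ∈ ks
      · exact ih u (by simpa [pvChase, hg, hu] using h)
      · simp [pvChase, hg, hu] at h

theorem pvMread_addAt (C : PySem.Dict Int (PySem.Dict Int Int)) (i k v i' k' : Int) :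
    pvMread (pvAddAt C i k v) i' k' = pvMread C i' k' + (if i' = i ∧ k' = k then v else 0) := by
  unfold pvMread pvAddAt
  rw [PySem.Dict.getD_insert]
  by_cases hi : i' = i
  · subst hi
    rw [if_pos rfl, PySem.Dict.getD_insert]
    by_cases hk : k' = k
    · subst hk; simp
    · simp [hk]
  · simp [hi]

theorem innerK_read (Bm : PySem.Dict Int (PySem.Dict Int Int)) (i j v : Int)
    (l : List Int) (hl : l.Nodup) :
    ∀ (C : PySem.Dict Int (PySem.Dict Int Int)) (i' k' : Int),
    pvMread (l.foldl (fun C k =>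
        if pvMread Bm j k ≠ 0 then pvAddAt C i k (v * pvMread Bm j k) else C) C) i' k'
    = pvMread C i' k' + (if i' = i ∧ k' ∈ l then v * pvMread Bm j k' else 0) := by
  induction l with
  | nil => intro C i' k'; simp
  | cons a l ih =>
    intro C i' k'
    rcases List.nodup_cons.mp hl with ⟨hna, hnl⟩
    rw [List.foldl_cons, ih hnl]
    have hstep : pvMread (if pvMread Bm j a ≠ 0 then pvAddAt C i a (v * pvMread Bm j a) else C) i' k'
        = pvMread C i' k' + (if i' = i ∧ k' = a then v * pvMread Bm j a else 0) := by
      by_cases hz : pvMread Bm j a ≠ 0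
      · rw [if_pos hz, pvMread_addAt]
      · rw [not_not] at hz
        rw [if_neg (by simp [hz]), hz]
        simp
    rw [hstep]
    by_cases hii : i' = i
    · subst hii
      by_cases hka : k' = a
      · subst hka
        simp [hna]
      · by_cases hkl : k' ∈ l <;> simp [hka, hkl]
    · simp [hii]

theorem jfold_read (Am Bm : PySem.Dict Int (PySem.Dict Int Int)) (nodes : List Int)
    (hn : nodes.Nodup) (i : Int) (l : List Int) :
    ∀ (C : PySem.Dict Int (PySem.Dict Int Int)) (i' k' : Int),
    pvMread (l.foldl (fun C j =>
      if pvMread Am i j ≠ 0 then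
        nodes.foldl (fun C k =>
          if pvMread Bm j k ≠ 0 then pvAddAt C i k (pvMread Am i j * pvMread Bm j k) else C) C
      else C) C) i' k'
    = pvMread C i' k' +
      (if i' = i ∧ k' ∈ nodes then (l.map (fun j => pvMread Am i j * pvMread Bm j k')).sum else 0) := by
  induction l with
  | nil => intro C i' k'; simp
  | cons a l ih =>
    intro C i' k'
    rw [List.foldl_cons, ih]
    have hstep : pvMread (if pvMread Am i a ≠ 0 then
        nodes.foldl (fun C k =>
          if pvMread Bm a k ≠ 0 then pvAddAt C i k (pvMread Am i a * pvMread Bm a k) else C) C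
      else C) i' k'
        = pvMread C i' k' + (if i' = i ∧ k' ∈ nodes then pvMread Am i a * pvMread Bm a k' else 0) := by
      by_cases hz : pvMread Am i a ≠ 0
      · rw [if_pos hz, innerK_read Bm i a (pvMread Am i a) nodes hn]
      · rw [not_not] at hz
        rw [if_neg (by simp [hz]), hz]
        simp
    rw [hstep]
    by_cases hcond : i' = i ∧ k' ∈ nodes
    · simp [hcond]; ring
    · simp [hcond]

theorem matmult_read (Am Bm : PySem.Dict Int (PySem.Dict Int Int)) (nodes : List Int)
    (hn : nodes.Nodup) (i' k' : Int) :
    pvMread (pvMatMult Am Bm nodes) i' k'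
    = if i' ∈ nodes ∧ k' ∈ nodes
      then (nodes.map (fun j => pvMread Am i' j * pvMread Bm j k')).sum else 0 := by
  unfold pvMatMult
  suffices h : ∀ (l : List Int), l.Nodup → (∀ x ∈ l, x ∈ nodes) →
      ∀ (C : PySem.Dict Int (PySem.Dict Int Int)),
      pvMread (l.foldl (fun C i =>
        nodes.foldl (fun C j =>
          if pvMread Am i j ≠ 0 then
            nodes.foldl (fun C k =>
              if pvMread Bm j k ≠ 0 then pvAddAt C i k (pvMread Am i j * pvMread Bm j k) else C) C
          else C) C) C) i' k'
      = pvMread C i' k' +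
        (if i' ∈ l ∧ k' ∈ nodes then (nodes.map (fun j => pvMread Am i' j * pvMread Bm j k')).sum else 0) by
    rw [h nodes hn (fun x hx => hx) PySem.Dict.empty]
    simp [pvMread]
  intro l
  induction l with
  | nil => intro _ _ C; simp
  | cons a l ih =>
    intro hl hsub C
    rcases List.nodup_cons.mp hl with ⟨hna, hnl⟩
    rw [List.foldl_cons, ih hnl (fun x hx => hsub x (.tail _ hx)),
        jfold_read Am Bm nodes hn a nodes]
    by_cases hii : i' = a
    · subst hii
      simp [hna]
    · by_cases hil : i' ∈ l <;> by_cases hk : k' ∈ nodes <;> simp [hii, hil, hk]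

theorem get?_eq_find (l : List (Int × Int)) (j : Int) :
    (PySem.Dict.mk l).get? j = (l.find? (fun p => p.1 == j)).map Prod.snd := by
  induction l with
  | nil => simp [PySem.Dict.get?]
  | cons a l ih =>
    rw [show (a :: l : List (Int × Int)) = (a.1, a.2) :: l by simp]
    rw [PySem.Dict.get?_mk_cons, List.find?_cons]
    by_cases h : a.1 == j
    · simp [h]
    · simp only [h]
      simpa using ih

theorem adj_fold_read (l : List (Int × Int)) (j k : Int) :
    ∀ (M : PySem.Dict Int (PySem.Dict Int Int)),
    (l.map Prod.fst).Nodup → (∀ p ∈ l, M.get? p.1 = none) →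
    pvMread (l.foldl (fun M p => M.insert p.1 ((M.getD p.1 PySem.Dict.empty).insert p.2 1)) M) j k
    = match l.find? (fun p => p.1 == j) with
      | some p => if k = p.2 then 1 else 0
      | none => pvMread M j k := by
  induction l with
  | nil => intro M _ _; simp
  | cons a l ih =>
    intro M hnd hM
    have hcons : (a.1 :: l.map Prod.fst).Nodup := by simpa using hnd
    rcases List.nodup_cons.mp hcons with ⟨hna, hnl⟩
    rw [List.foldl_cons, List.find?_cons]
    have hfresh : ∀ p ∈ l, (M.insert a.1 ((M.getD a.1 PySem.Dict.empty).insert a.2 1)).get? p.1 = none := by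
      intro p hp
      rw [PySem.Dict.get?_insert_of_ne _ _ (fun (e : p.1 = a.1) => hna (e ▸ List.mem_map_of_mem hp))]
      exact hM p (.tail _ hp)
    rw [ih _ hnl hfresh]
    by_cases hj : a.1 == j
    · have hj' : a.1 = j := by simpa using hj
      subst hj'
      have hfind : l.find? (fun p => p.1 == a.1) = none := by
        rw [List.find?_eq_none]
        intro p hp
        simp only [beq_iff_eq]
        exact fun (e : p.1 = a.1) => hna (e ▸ List.mem_map_of_mem hp)
      rw [hfind]
      simp only [hj]
      unfold pvMread
      rw [PySem.Dict.getD_insert, if_pos rfl,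
          PySem.Dict.getD_of_get?_eq_none _ _ (hM a (.head _)), PySem.Dict.getD_insert]
      by_cases hk : k = a.2 <;> simp [hk, PySem.Dict.getD_empty]
    · simp only [hj]
      cases hfind : l.find? (fun p => p.1 == j) with
      | some p => simp
      | none =>
        simp only []
        unfold pvMread
        rw [PySem.Dict.getD_insert, if_neg (by simpa using fun e => (by simp [e] at hj))]

theorem adj_read (d : PySem.Dict Int Int) (hnd : d.keys.Nodup) (j k : Int) :
    pvMread (pvAdjOf d) j k = if d.get? j = some k then 1 else 0 := by
  unfold pvAdjOf
  have hitems : (d.items.map Prod.fst).Nodup := by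
    have h : d.keys = d.items.map Prod.fst := rfl
    rwa [h] at hnd
  rw [adj_fold_read d.items j k PySem.Dict.empty hitems (fun p _ => PySem.Dict.get?_empty _)]
  have hget : d.get? j = (d.items.find? (fun p => p.1 == j)).map Prod.snd := by
    have h : d = PySem.Dict.mk d.items := rfl
    rw [h, get?_eq_find]
  cases hfind : d.items.find? (fun p => p.1 == j) with
  | none => simp [hget, hfind, pvMread]
  | some p =>
    rw [hget, hfind]
    simp only [Option.map_some]
    by_cases hk : k = p.2
    · simp [hk]
    · simp [hk, Ne.symm hk]

theorem sum_single (l : List Int) (hl : l.Nodup) (j0 : Int) (hj : j0 ∈ l) (c : Int) :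
    (l.map (fun j => if j = j0 then c else 0)).sum = c := by
  induction l with
  | nil => simp at hj
  | cons a l ih =>
    rcases List.nodup_cons.mp hl with ⟨hna, hnl⟩
    rcases List.mem_cons.mp hj with h | h
    · subst h
      have hz : (List.map (fun j => if j = j0 then c else 0) l).sum = 0 := by
        apply List.sum_eq_zero
        intro x hx
        obtain ⟨j, hjl, rfl⟩ := List.mem_map.mp hx
        have hne : j ≠ j0 := fun e => hna (e ▸ hjl)
        simp [hne]
      simp [hz]
    · have ha : a ≠ j0 := fun e => hna (e ▸ h)
      simp [ha, ih hnl h]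

theorem cur_read (d : PySem.Dict Int Int) (hnd : d.keys.Nodup) (m : Nat) (i k : Int)
    (hi : i ∈ PySem.List.sorted d.keys (fun x => x) false)
    (hk : k ∈ PySem.List.sorted d.keys (fun x => x) false) :
    pvMread ((List.range m).foldl
        (fun cur _ => pvMatMult cur (pvAdjOf d) (PySem.List.sorted d.keys (fun x => x) false))
        (pvAdjOf d)) i k
    = if pvChase d d.keys i (m + 1) = some k then 1 else 0 := by
  have hnn : (PySem.List.sorted d.keys (fun x => x) false).Nodup :=
    (PySem.List.sorted_perm d.keys (fun x => x) false).nodup_iff.mpr hnd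
  have hkmem : ∀ x : Int, x ∈ PySem.List.sorted d.keys (fun x => x) false ↔ x ∈ d.keys :=
    fun x => PySem.List.mem_sorted d.keys (fun x => x) false x
  revert hi hk
  induction m generalizing i k with
  | zero =>
    intro hi hk
    simp only [List.range_zero, List.foldl_nil]
    rw [adj_read d hnd i k]
    have hk' : k ∈ d.keys := (hkmem k).mp hk
    cases hg : d.get? i with
    | none => simp [pvChase, hg]
    | some u =>
      by_cases hu : u ∈ d.keys
      · simp [pvChase, hg, hu]
      · have hne : u ≠ k := fun e => hu (e ▸ hk')
        simp [pvChase, hg, hu, hne]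
  | succ m ih =>
    intro hi hk
    rw [List.range_succ, List.foldl_append, List.foldl_cons, List.foldl_nil]
    rw [matmult_read _ _ _ hnn i k, if_pos ⟨hi, hk⟩]
    have hrw : ∀ j ∈ PySem.List.sorted d.keys (fun x => x) false,
        pvMread ((List.range m).foldl
          (fun cur _ => pvMatMult cur (pvAdjOf d) (PySem.List.sorted d.keys (fun x => x) false))
          (pvAdjOf d)) i j * pvMread (pvAdjOf d) j k
        = (if pvChase d d.keys i (m + 1) = some j then 1 else 0) *
          (if d.get? j = some k then 1 else 0) := by
      intro j hj
      rw [ih i j hi hj, adj_read d hnd j k]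
    rw [List.map_congr_left hrw]
    have hk' : k ∈ d.keys := (hkmem k).mp hk
    cases hch : pvChase d d.keys i (m + 1) with
    | none =>
      rw [pvChase_succ_right, hch]
      have hz : ∀ x ∈ List.map (fun a => (if (none : Option Int) = some a then (1 : Int) else 0) *
          (if d.get? a = some k then 1 else 0)) (PySem.List.sorted d.keys (fun x => x) false), x = 0 := by
        intro x hx
        obtain ⟨j, hj, rfl⟩ := List.mem_map.mp hx
        simp
      rw [List.sum_eq_zero hz]
      simp
    | some j0 =>
      have hj0n : j0 ∈ PySem.List.sorted d.keys (fun x => x) false :=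
        (hkmem j0).mpr (pvChase_mem d d.keys m i j0 hch)
      have hc2 : ∀ j ∈ PySem.List.sorted d.keys (fun x => x) false,
          (if (some j0 : Option Int) = some j then (1 : Int) else 0) *
            (if d.get? j = some k then 1 else 0)
          = (if j = j0 then (if d.get? j0 = some k then (1 : Int) else 0) else 0) := by
        intro j hj
        by_cases e : j = j0
        · subst e; simp
        · simp [e, Ne.symm e]
      rw [List.map_congr_left hc2, sum_single _ hnn j0 hj0n]
      rw [pvChase_succ_right, hch]
      simp only [Option.bind_some]
      cases hg : d.get? j0 with
      | none => simp [pvStep, hg]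
      | some u =>
        by_cases hu : u ∈ d.keys
        · simp [pvStep, hg, hu]
        · have hne : u ≠ k := fun e => hu (e ▸ hk')
          simp [pvStep, hg, hu, hne]

theorem fib_iter_shift (m : Nat) :
    (List.range (m + 1)).foldl (fun (p : Int × Int) _ => (p.2, p.1 + p.2)) (0, 1)
    = (List.range m).foldl (fun (p : Int × Int) _ => (p.2, p.1 + p.2)) (1, 1) := by
  induction m with
  | zero => simp [List.range_succ]
  | succ m ih =>
    rw [List.range_succ, List.foldl_append, ih, List.range_succ, List.foldl_append]
    simp

theorem fib_eq (n : Int) : pvFib n = pvFibAlt n := by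
  unfold pvFib pvFibAlt
  by_cases h : n ≤ 0
  · have h0 : (max n 0).toNat = 0 := by
      have hm : max n 0 = 0 := max_eq_right h
      rw [hm]
      rfl
    rw [if_pos h, h0]
    simp
  · have hmax : max n 0 = n := max_eq_left (by omega)
    have h1 : (max n 0).toNat = (n - 1).toNat + 1 := by rw [hmax]; omega
    rw [if_neg h, h1, fib_iter_shift]

-- generic: a fold whose body appends g a (for elements satisfying P) is init ++ flatMap
theorem foldl_append_of_mem {α β : Type} (P : α → Prop) (body : List β → α → List β)
    (g : α → List β) (h : ∀ res a, P a → body res a = res ++ g a) :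
    ∀ (l : List α), (∀ a ∈ l, P a) → ∀ res, l.foldl body res = res ++ l.flatMap g := by
  intro l
  induction l with
  | nil => intro _ res; simp
  | cons a l ih =>
    intro hP res
    simp only [List.foldl_cons, h res a (hP a (.head _)), List.flatMap_cons]
    rw [ih (fun x hx => hP x (.tail _ hx)), List.append_assoc]

theorem row_fold (cur : PySem.Dict Int (PySem.Dict Int Int)) (i fib : Int)
    (d : PySem.Dict Int Int) (ks : List Int) (N : Nat) (l : List Int) :
    ∀ res, l.Nodup → (∀ j ∈ l, pvMread cur i j = if pvChase d ks i N = some j then 1 else 0) →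
    l.foldl (fun res j =>
        if pvMread cur i j > 0 then res ++ [(i, j, fib * pvMread cur i j)] else res) res
      = res ++ (match pvChase d ks i N with
        | some t => if t ∈ l then [(i, t, fib)] else []
        | none => []) := by
  induction l with
  | nil => intro res _ _; cases h : pvChase d ks i N <;> simp [h]
  | cons a l ih =>
    intro res hl hinv
    rcases List.nodup_cons.mp hl with ⟨hna, hnl⟩
    have hinva := hinv a (.head _)
    rw [List.foldl_cons,
        ih (if pvMread cur i a > 0 then res ++ [(i, a, fib * pvMread cur i a)] else res) hnl
          (fun j hj => hinv j (.tail _ hj))]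
    cases hch : pvChase d ks i N with
    | none =>
      have h0 : pvMread cur i a = 0 := by rw [hinva, hch]; simp
      simp [h0]
    | some t =>
      by_cases hta : t = a
      · have h1 : pvMread cur i a = 1 := by rw [hinva, hch]; simp [hta]
        simp [h1, hta, hna]
      · have h0 : pvMread cur i a = 0 := by
          rw [hinva, hch]
          simp [fun e : t = a => hta e]
        simp [h0, hta]

theorem main_eq (mapping : List (Int × Int)) (num_steps : Int) :
    fibonacci_path_weights mapping num_steps = fibonacci_path_weights_alt mapping num_steps := by
  simp only [fibonacci_path_weights, fibonacci_path_weights_alt]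
  rw [fib_eq]
  have hnd : (PySem.Dict.ofList mapping).keys.Nodup := PySem.Dict.nodup_keys_ofList mapping
  set d := PySem.Dict.ofList mapping with hd
  set nodes := PySem.List.sorted d.keys (fun x => x) false with hns
  have hnn : nodes.Nodup := (PySem.List.sorted_perm d.keys (fun x => x) false).nodup_iff.mpr hnd
  have hkmem : ∀ x : Int, x ∈ nodes ↔ x ∈ d.keys :=
    fun x => PySem.List.mem_sorted d.keys (fun x => x) false x
  set N : Nat := (num_steps - 1).toNat with hNdef
  set fib := pvFibAlt num_steps with hfib
  set g : Int → List (Int × Int × Int) := fun i0 => (match pvChase d d.keys i0 (N + 1) with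
    | some t => [(i0, t, fib)]
    | none => []) with hg
  have hbodyA : ∀ (res : List (Int × Int × Int)) (i0 : Int), i0 ∈ nodes →
      nodes.foldl (fun res j =>
        if pvMread ((List.range N).foldl (fun cur _ => pvMatMult cur (pvAdjOf d) nodes) (pvAdjOf d)) i0 j > 0
        then res ++ [(i0, j, fib * pvMread ((List.range N).foldl (fun cur _ => pvMatMult cur (pvAdjOf d) nodes) (pvAdjOf d)) i0 j)]
        else res) res
      = res ++ g i0 := by
    intro res i0 hi0
    rw [row_fold ((List.range N).foldl (fun cur _ => pvMatMult cur (pvAdjOf d) nodes) (pvAdjOf d))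
        i0 fib d d.keys (N + 1) nodes res hnn
        (fun j hj => cur_read d hnd N i0 j hi0 hj)]
    cases hch : pvChase d d.keys i0 (N + 1) with
    | none => simp [hg, hch]
    | some t =>
      have ht : t ∈ nodes := (hkmem t).mpr (pvChase_mem d d.keys N i0 t hch)
      simp [hg, hch, ht]
  have hbodyB : ∀ (res : List (Int × Int × Int)) (start : Int), True →
      (match d.get? start with
       | none => res
       | some t =>
         if t ∈ d.keys then
           match pvChase d d.keys t N with
           | some tf => res ++ [(start, tf, fib)]
           | none => res
         else res)
      = res ++ g start := by
    intro res start _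
    have hunf : pvChase d d.keys start (N + 1)
        = (match d.get? start with
           | none => none
           | some t => if t ∈ d.keys then pvChase d d.keys t N else none) := rfl
    cases hgq : d.get? start with
    | none => simp [hg, hunf, hgq]
    | some t =>
      by_cases htk : t ∈ d.keys
      · cases hcc : pvChase d d.keys t N with
        | none => simp [hg, hunf, hgq, htk, hcc]
        | some tf => simp [hg, hunf, hgq, htk, hcc]
      · simp [hg, hunf, hgq, htk]
  rw [foldl_append_of_mem (fun i0 => i0 ∈ nodes) _ g hbodyA nodes (fun a ha => ha) [],
      foldl_append_of_mem (fun _ : Int => True) _ g hbodyB nodes (fun _ _ => trivial) []]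

-- ===== VERDICT (by name: the statement is the Claim_ definition above) =====
theorem fibonacci_path_weights_spec : Claim_equal_fibonacci_path_weights := by
  intro mapping num_steps _
  exact main_eq mapping num_steps
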